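-- pv_equiv track=rewrite | github.com/jonwihl/15-110-Principles-of-Computing-Coursework | missing_child.py | missing_child
-- ===== SOURCE A (Python) =====
-- def left_index(i):
-- 	left_node = i + (i + 1)
-- 	return left_node
--
-- def right_index(i):
-- 	right_node = i + (i + 2)
-- 	return right_node
--
-- def is_leaf(tree, i):
-- 	left = left_index(i)
-- 	right = right_index(i)
-- 	if left > len(tree) or right > len(tree):
-- 		return True
-- 	else:
-- 		return False
--
-- def missing_child(tree, i):
-- 	if is_leaf(tree, i):
-- 		return []
-- 	elif tree[right_index(i)] == None:
-- 		return [tree[i]] + missing_child(tree, left_index(i))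
-- 	elif tree[left_index(i)] == None:
-- 		return [tree[i]] + missing_child(tree, right_index(i))
-- 	else:
-- 		return missing_child(tree, left_index(i)) + missing_child(tree, right_index(i))
-- ===== SOURCE B (Python) =====
-- def left_index(i):
--     return i + (i + 1)
--
-- def right_index(i):
--     return i + (i + 2)
--
-- def is_leaf(tree, i):
--     left = left_index(i)
--     right = right_index(i)
--     if left > len(tree) or right > len(tree):
--         return True
--     else:
--         return False
--
-- def missing_child(tree, i):
--     result = []
--     stack = [i]
--     while stack:
--         j = stack.pop()
--         if is_leaf(tree, j):
--             continue
--         if tree[right_index(j)] == None: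
--             result.append(tree[j])
--             stack.append(left_index(j))
--         elif tree[left_index(j)] == None:
--             result.append(tree[j])
--             stack.append(right_index(j))
--         else:
--             stack.append(right_index(j))
--             stack.append(left_index(j))
--     return result
-- ===== Notes on version B (the rewrite author's own statement) =====
-- stated objective: alternative
-- what changed: Replaces the four-way self-recursion with an iterative explicit-stack DFS (push right then left, append to an accumulator), keeping the left_index/right_index/is_leaf helpers.
-- outside the precondition, e.g. on missing_child([None, 1, None], 0): A returns [None], B returns [None]; on missing_child([None, None, 3, 4], 0): A returns [None], B returns [None]
import Mathlib
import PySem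

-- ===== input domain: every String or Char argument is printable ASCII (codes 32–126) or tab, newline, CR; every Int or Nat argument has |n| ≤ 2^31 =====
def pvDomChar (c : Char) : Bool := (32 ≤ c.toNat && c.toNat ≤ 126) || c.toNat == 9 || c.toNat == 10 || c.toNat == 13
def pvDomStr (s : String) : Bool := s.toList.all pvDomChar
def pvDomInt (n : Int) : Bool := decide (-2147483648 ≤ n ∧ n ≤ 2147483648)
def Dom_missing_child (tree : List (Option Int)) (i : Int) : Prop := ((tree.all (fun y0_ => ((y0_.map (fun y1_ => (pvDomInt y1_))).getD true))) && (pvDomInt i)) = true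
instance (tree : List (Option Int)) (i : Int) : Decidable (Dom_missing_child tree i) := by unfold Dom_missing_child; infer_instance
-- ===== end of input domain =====

-- B is an iterative explicit-stack DFS instead of A's four-way self-recursion; same cost, equal return values on Pre_.

-- ===== PORT A =====
-- shared helpers of the Python module (used verbatim by both A and B)
def left_index_p (i : Int) : Int := i + (i + 1)

def right_index_p (i : Int) : Int := i + (i + 2)

def is_leaf_p (tree : List (Option Int)) (i : Int) : Bool :=
  if left_index_p i > (tree.length : Int) ∨ right_index_p i > (tree.length : Int) then true else false

-- tree[j]: in-range access yields the element; out-of-range (Python IndexError, outside Pre_) collapses to none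
def getJ (tree : List (Option Int)) (j : Int) : Option Int := (PySem.List.pyGet? tree j).join

-- literal recursion of A; fuel bounds the recursion depth (tree.length + 1 suffices on Pre_, where 0 ≤ i)
def missing_childF (tree : List (Option Int)) : Nat → Int → List Int
  | 0, _ => []
  | Nat.succ fuel, i =>
      if is_leaf_p tree i then []
      else if getJ tree (right_index_p i) = none then
        (getJ tree i).getD 0 :: missing_childF tree fuel (left_index_p i)
      else if getJ tree (left_index_p i) = none then
        (getJ tree i).getD 0 :: missing_childF tree fuel (right_index_p i)
      else missing_childF tree fuel (left_index_p i) ++ missing_childF tree fuel (right_index_p i)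

def missing_child (tree : List (Option Int)) (i : Int) : List Int :=
  missing_childF tree (tree.length + 1) i

-- ===== PORT B =====
-- the while loop of Source B: stack head = stack top; fuel bounds the number of pops (2^(n+1) suffices on Pre_)
def missing_childAltF (tree : List (Option Int)) : Nat → List Int → List Int → List Int
  | 0, _, result => result
  | Nat.succ fuel, stack, result =>
      match stack with
      | [] => result
      | j :: rest =>
        if is_leaf_p tree j then missing_childAltF tree fuel rest result
        else if getJ tree (right_index_p j) = none then
          missing_childAltF tree fuel (left_index_p j :: rest) (result ++ [(getJ tree j).getD 0])
        else if getJ tree (left_index_p j) = none then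
          missing_childAltF tree fuel (right_index_p j :: rest) (result ++ [(getJ tree j).getD 0])
        else missing_childAltF tree fuel (left_index_p j :: right_index_p j :: rest) result

def missing_child_alt (tree : List (Option Int)) (i : Int) : List Int :=
  missing_childAltF tree (2 ^ (tree.length + 1)) [i] []

-- ===== PRECONDITION & SPEC =====
-- followB tree p c: from the non-leaf node p the traversal continues into its child c
-- (right child only when tree[2p+2] is not None; left child unless the right child is
-- present and the left child is None), and the right-child access stays in range
def followB (tree : List (Option Int)) (p c : Nat) : Bool :=
  decide (2 * p + 2 < tree.length) &&
  (if c = 2 * p + 2 then !(tree.getD (2 * p + 2) none).isNone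
   else (tree.getD (2 * p + 2) none).isNone || !(tree.getD (2 * p + 1) none).isNone)

-- vreachB tree i j: j is visited by the traversal started at i, i.e. every step of the
-- unique heap ancestor chain from i down to j satisfies followB
-- (the chain from j has fewer than j steps, so the first argument j bounds its length
-- and makes the walk structurally recursive, hence computable by `decide`)
def vreachAux (tree : List (Option Int)) (i : Nat) : Nat → Nat → Bool
  | 0, j => decide (j = i)
  | Nat.succ d, j =>
      if j = i then true
      else if j = 0 then false
      else vreachAux tree i d ((j - 1) / 2) && followB tree ((j - 1) / 2) j

def vreachB (tree : List (Option Int)) (i : Nat) (j : Nat) : Bool :=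
  vreachAux tree i j j

-- goodB tree j: at a visited node j, A neither raises nor emits None: the right-child
-- access is strictly in range, and if a child is None (so tree[j] is emitted) tree[j] is an int
def goodB (tree : List (Option Int)) (j : Nat) : Bool :=
  if 2 * j + 2 ≤ tree.length then
    decide (2 * j + 2 < tree.length) &&
    (!(tree.getD (2 * j + 2) none).isNone && !(tree.getD (2 * j + 1) none).isNone
      || !(tree.getD j none).isNone)
  else true

-- Pre_ excludes exactly the inputs on which A does not return a plain list of ints: negative i
-- (A indexes out of range or recurses without bound and raises), inputs whose value-pruned
-- traversal visits the even-length boundary node with 2j+2 = len(tree) (IndexError at tree[len]),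
-- and inputs where a visited node with a missing child itself holds None (A's returned list then
-- contains None, not an int).
def Pre_missing_child (tree : List (Option Int)) (i : Int) : Prop :=
  0 ≤ i ∧
  ∀ j ∈ List.range (tree.length + 1), vreachB tree i.toNat j = true → goodB tree j = true

instance (tree : List (Option Int)) (i : Int) : Decidable (Pre_missing_child tree i) := by
  unfold Pre_missing_child; infer_instance

def pvWitness_missing_child : List (Option Int) × Int := ([some 1, none, some 3], 0)

def Spec_missing_child (tree : List (Option Int)) (i : Int) (out : List Int) : Prop := out = missing_child_alt tree i
instance (tree : List (Option Int)) (i : Int) (out : List Int) : Decidable (Spec_missing_child tree i out) := by unfold Spec_missing_child; infer_instance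

-- ===== CLAIM (what is proved, stated in full; the proofs are below) =====
def Claim_equal_missing_child : Prop := ∀ (tree : List (Option Int)) (i : Int), Dom_missing_child tree i → Pre_missing_child tree i → Spec_missing_child tree i (missing_child tree i)

-- ===== LEMMAS AND PROOFS =====

-- reference function: A's recursion without fuel (well-founded; proof device only)
def mcW (tree : List (Option Int)) (i : Int) : List Int :=
  if h : is_leaf_p tree i = true ∨ i < 0 then []
  else if getJ tree (right_index_p i) = none then
    (getJ tree i).getD 0 :: mcW tree (left_index_p i)
  else if getJ tree (left_index_p i) = none then
    (getJ tree i).getD 0 :: mcW tree (right_index_p i)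
  else mcW tree (left_index_p i) ++ mcW tree (right_index_p i)
termination_by ((tree.length : Int) + 2 - i).toNat
decreasing_by
  all_goals simp only [is_leaf_p, left_index_p, right_index_p, not_or] at h ⊢
  all_goals (split at h; · exact absurd rfl h.1) <;> omega

-- number of pops B performs on the subtree rooted at i
def cnt (tree : List (Option Int)) (i : Int) : Nat :=
  if h : is_leaf_p tree i = true ∨ i < 0 then 1
  else if getJ tree (right_index_p i) = none then 1 + cnt tree (left_index_p i)
  else if getJ tree (left_index_p i) = none then 1 + cnt tree (right_index_p i)
  else 1 + cnt tree (left_index_p i) + cnt tree (right_index_p i)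
termination_by ((tree.length : Int) + 2 - i).toNat
decreasing_by
  all_goals simp only [is_leaf_p, left_index_p, right_index_p, not_or] at h ⊢
  all_goals (split at h; · exact absurd rfl h.1) <;> omega

theorem cnt_pos (tree : List (Option Int)) (i : Int) : 1 ≤ cnt tree i := by
  rw [cnt]; split
  · exact le_refl 1
  · split
    · omega
    · split <;> omega

theorem not_leaf_arith (tree : List (Option Int)) (i : Int)
    (h : ¬ is_leaf_p tree i = true) : 2 * i + 2 ≤ (tree.length : Int) := by
  simp only [is_leaf_p, left_index_p, right_index_p] at h
  split at h
  · exact absurd rfl h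
  · omega

theorem cnt_le (tree : List (Option Int)) (i : Int) (hi : 0 ≤ i) :
    cnt tree i ≤ 2 ^ (((tree.length : Int) + 1 - i).toNat) := by
  rw [cnt]
  split
  · exact Nat.one_le_two_pow
  · rename_i h
    rw [not_or] at h
    have harith := not_leaf_arith tree i h.1
    have hl : cnt tree (left_index_p i) ≤ 2 ^ (((tree.length : Int) + 1 - left_index_p i).toNat) :=
      cnt_le tree (left_index_p i) (by simp only [left_index_p]; omega)
    have hr : cnt tree (right_index_p i) ≤ 2 ^ (((tree.length : Int) + 1 - right_index_p i).toNat) :=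
      cnt_le tree (right_index_p i) (by simp only [right_index_p]; omega)
    have e1 : ((tree.length : Int) + 1 - left_index_p i).toNat + 1 ≤ (((tree.length : Int) + 1 - i).toNat) := by
      simp only [left_index_p]; omega
    have e2 : ((tree.length : Int) + 1 - right_index_p i).toNat + 2 ≤ (((tree.length : Int) + 1 - i).toNat) := by
      simp only [right_index_p]; omega
    have p1 : 2 ^ (((tree.length : Int) + 1 - left_index_p i).toNat) * 2 ≤ 2 ^ (((tree.length : Int) + 1 - i).toNat) := by
      calc 2 ^ (((tree.length : Int) + 1 - left_index_p i).toNat) * 2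
          = 2 ^ (((tree.length : Int) + 1 - left_index_p i).toNat + 1) := by rw [pow_succ]
        _ ≤ 2 ^ (((tree.length : Int) + 1 - i).toNat) := Nat.pow_le_pow_right (by norm_num) e1
    have p2 : 2 ^ (((tree.length : Int) + 1 - right_index_p i).toNat) * 4 ≤ 2 ^ (((tree.length : Int) + 1 - i).toNat) := by
      calc 2 ^ (((tree.length : Int) + 1 - right_index_p i).toNat) * 4
          = 2 ^ (((tree.length : Int) + 1 - right_index_p i).toNat + 2) := by rw [pow_add]; norm_num
        _ ≤ 2 ^ (((tree.length : Int) + 1 - i).toNat) := Nat.pow_le_pow_right (by norm_num) e2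
    have hpl := Nat.one_le_two_pow (n := ((tree.length : Int) + 1 - left_index_p i).toNat)
    have hpr := Nat.one_le_two_pow (n := ((tree.length : Int) + 1 - right_index_p i).toNat)
    split
    · omega
    · split <;> omega
termination_by ((tree.length : Int) + 2 - i).toNat
decreasing_by
  all_goals simp only [left_index_p, right_index_p]
  all_goals omega

-- A's fueled recursion computes mcW once fuel covers the remaining depth
theorem missing_childF_eq_mcW (tree : List (Option Int)) :
    ∀ (fuel : Nat) (i : Int), 0 ≤ i → (tree.length : Int) + 1 ≤ (fuel : Int) + i →
    missing_childF tree fuel i = mcW tree i := by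
  intro fuel
  induction fuel with
  | zero =>
    intro i hi hf
    rw [missing_childF, mcW]
    have : is_leaf_p tree i = true := by
      simp only [is_leaf_p, left_index_p, right_index_p]
      split
      · rfl
      · simp at hf; omega
    simp [this]
  | succ fuel ih =>
    intro i hi hf
    rw [missing_childF, mcW]
    by_cases hl : is_leaf_p tree i = true
    · simp [hl]
    · have harith := not_leaf_arith tree i hl
      have hcond : ¬ (is_leaf_p tree i = true ∨ i < 0) := by
        rw [not_or]; exact ⟨hl, by omega⟩
      rw [if_neg hl, dif_neg hcond]
      have recl : missing_childF tree fuel (left_index_p i) = mcW tree (left_index_p i) := by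
        apply ih
        · simp only [left_index_p]; omega
        · push_cast at hf ⊢; simp only [left_index_p]; omega
      have recr : missing_childF tree fuel (right_index_p i) = mcW tree (right_index_p i) := by
        apply ih
        · simp only [right_index_p]; omega
        · push_cast at hf ⊢; simp only [right_index_p]; omega
      rw [recl, recr]

-- B's loop, given fuel for every pop, flushes the stack to the concatenation of mcW over it
theorem missing_childAltF_eq (tree : List (Option Int)) :
    ∀ (fuel : Nat) (stack : List Int) (result : List Int),
    (∀ j ∈ stack, 0 ≤ j) → (stack.map (cnt tree)).sum ≤ fuel →
    missing_childAltF tree fuel stack result = result ++ (stack.map (mcW tree)).flatten := by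
  intro fuel
  induction fuel with
  | zero =>
    intro stack result hnn hfuel
    cases stack with
    | nil => rw [missing_childAltF]; simp
    | cons j rest =>
      exfalso
      have := cnt_pos tree j
      simp [List.map_cons, List.sum_cons] at hfuel
      omega
  | succ fuel ih =>
    intro stack result hnn hfuel
    cases stack with
    | nil => rw [missing_childAltF]; simp
    | cons j rest =>
      have hj : 0 ≤ j := hnn j (List.mem_cons_self ..)
      have hrest : ∀ x ∈ rest, 0 ≤ x := fun x hx => hnn x (List.mem_cons_of_mem _ hx)
      simp only [List.map_cons, List.sum_cons] at hfuel
      rw [missing_childAltF]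
      by_cases hl : is_leaf_p tree j = true
      · rw [if_pos hl]
        rw [ih rest result hrest (by have := cnt_pos tree j; omega)]
        have : mcW tree j = [] := by rw [mcW]; simp [hl]
        simp [this]
      · have harith := not_leaf_arith tree j hl
        have hcond : ¬ (is_leaf_p tree j = true ∨ j < 0) := by
          rw [not_or]; exact ⟨hl, by omega⟩
        rw [if_neg hl]
        have hmw : mcW tree j =
            (if getJ tree (right_index_p j) = none then
              (getJ tree j).getD 0 :: mcW tree (left_index_p j)
            else if getJ tree (left_index_p j) = none then
              (getJ tree j).getD 0 :: mcW tree (right_index_p j)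
            else mcW tree (left_index_p j) ++ mcW tree (right_index_p j)) := by
          rw [mcW]; rw [dif_neg hcond]
        have hcnt : cnt tree j =
            (if getJ tree (right_index_p j) = none then 1 + cnt tree (left_index_p j)
            else if getJ tree (left_index_p j) = none then 1 + cnt tree (right_index_p j)
            else 1 + cnt tree (left_index_p j) + cnt tree (right_index_p j)) := by
          rw [cnt]; rw [dif_neg hcond]
        have hln : 0 ≤ left_index_p j := by simp only [left_index_p]; omega
        have hrn : 0 ≤ right_index_p j := by simp only [right_index_p]; omega
        by_cases hR : getJ tree (right_index_p j) = none
        · rw [if_pos hR]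
          rw [if_pos hR] at hmw hcnt
          rw [ih (left_index_p j :: rest) (result ++ [(getJ tree j).getD 0])
              (by intro x hx
                  cases List.mem_cons.mp hx with
                  | inl h => omega
                  | inr h => exact hrest x h)
              (by simp only [List.map_cons, List.sum_cons]; omega)]
          simp only [List.map_cons, List.flatten_cons]
          rw [hmw]; simp
        · rw [if_neg hR]
          rw [if_neg hR] at hmw hcnt
          by_cases hL : getJ tree (left_index_p j) = none
          · rw [if_pos hL]
            rw [if_pos hL] at hmw hcnt
            rw [ih (right_index_p j :: rest) (result ++ [(getJ tree j).getD 0])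
                (by intro x hx
                    cases List.mem_cons.mp hx with
                    | inl h => omega
                    | inr h => exact hrest x h)
                (by simp only [List.map_cons, List.sum_cons]; omega)]
            simp only [List.map_cons, List.flatten_cons]
            rw [hmw]; simp
          · rw [if_neg hL]
            rw [if_neg hL] at hmw hcnt
            rw [ih (left_index_p j :: right_index_p j :: rest) result
                (by intro x hx
                    cases List.mem_cons.mp hx with
                    | inl h => omega
                    | inr h =>
                      cases List.mem_cons.mp h with
                      | inl h2 => omega
                      | inr h2 => exact hrest x h2)
                (by simp only [List.map_cons, List.sum_cons]; omega)]
            simp only [List.map_cons, List.flatten_cons]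
            rw [hmw]; simp

-- ===== VERDICT (by name: the statement is the Claim_ definition above) =====
theorem missing_child_spec : Claim_equal_missing_child := by
  intro tree i _hdom hpre
  obtain ⟨hi, -⟩ := hpre
  unfold Spec_missing_child missing_child missing_child_alt
  rw [missing_childF_eq_mcW tree (tree.length + 1) i hi (by push_cast; omega)]
  rw [missing_childAltF_eq tree (2 ^ (tree.length + 1)) [i] []
      (by intro x hx; simp at hx; omega)
      (by
        simp only [List.map_cons, List.map_nil, List.sum_cons, List.sum_nil, Nat.add_zero]
        calc cnt tree i ≤ 2 ^ (((tree.length : Int) + 1 - i).toNat) := cnt_le tree i hi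
          _ ≤ 2 ^ (tree.length + 1) := Nat.pow_le_pow_right (by norm_num) (by omega))]
  simp
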